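-- pv_equiv track=rewrite | github.com/eaindome/Programming | Advent_of_Code/2020/Day-17/trials/trial-4.py | count_active_cubes
-- ===== SOURCE A (Python) =====
-- def count_active_cubes(initial_state, cycles):
--     # create a set to active cubes (x,y,z)
--     active_cubes = set()
--
--     # parse the initial_state to populate the active_cubes set
--     for y, row in enumerate(initial_state):
--         for x, cell in enumerate(row):
--             if cell == '#':
--                 active_cubes.add((x, y, 0))
--
--     # define the neighbors' relative coordinates
--     neighbors = [(dx, dy, dz) for dx in range(-1, 2) for dy in range(-1, 2) for dz in range(-1, 2) if (dx, dy, dz) != (0, 0, 0)]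
--
--     # simulate the cycles
--     for _ in range(cycles):
--         new_active_cubes = set()
--         inactive_to_check = set()
--
--         # check inactive cubes neighboring active cubes
--         for cube in active_cubes:
--             x, y, z = cube
--             active_neighbors = 0
--
--             for dx, dy, dz in neighbors:
--                 neighbor = (x + dx, y + dy, z + dz)
--
--                 if neighbor in active_cubes:
--                     active_neighbors += 1
--                 else:
--                     inactive_to_check.add(neighbor)
--
--             if active_neighbors in [2, 3]:
--                 new_active_cubes.add(cube)
--
--         # check inactive cubes to become active
--         for cube in inactive_to_check:
--             x, y, z = cube
--             active_neighbors = 0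
--
--             for dx, dy, dz in neighbors:
--                 neighbor = (x + dx, y + dy, z + dz)
--
--                 if neighbor in active_cubes:
--                     active_neighbors += 1
--             if active_neighbors == 3:
--                 new_active_cubes.add(cube)
--
--         active_cubes = new_active_cubes
--     return len(active_cubes)
-- ===== SOURCE B (Python) =====
-- def count_active_cubes(initial_state, cycles):
--     active = set()
--     for y, row in enumerate(initial_state):
--         for x, cell in enumerate(row):
--             if cell == '#':
--                 active.add((x, y, 0))
--
--     neighbors = [(dx, dy, dz) for dx in range(-1, 2) for dy in range(-1, 2) for dz in range(-1, 2) if (dx, dy, dz) != (0, 0, 0)]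
--
--     for _ in range(cycles):
--         # one pass: tally each cell's number of active neighbours
--         counts = {}
--         for (x, y, z) in active:
--             for (dx, dy, dz) in neighbors:
--                 nb = (x + dx, y + dy, z + dz)
--                 counts[nb] = counts.get(nb, 0) + 1
--         active = {c for c, n in counts.items() if n == 3 or (n == 2 and c in active)}
--     return len(active)
-- ===== Notes on version B (the rewrite author's own statement) =====
-- stated objective: alternative
-- what changed: Each cycle makes a single pass tallying every active cube's 26 neighbour contributions into one dict and applies the birth/survival rule to the tally, instead of A's two-phase rescan (count 26 neighbours of every active cube, collect inactive candidates, then rescan each candidate's 26 neighbours).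
import Mathlib
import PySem

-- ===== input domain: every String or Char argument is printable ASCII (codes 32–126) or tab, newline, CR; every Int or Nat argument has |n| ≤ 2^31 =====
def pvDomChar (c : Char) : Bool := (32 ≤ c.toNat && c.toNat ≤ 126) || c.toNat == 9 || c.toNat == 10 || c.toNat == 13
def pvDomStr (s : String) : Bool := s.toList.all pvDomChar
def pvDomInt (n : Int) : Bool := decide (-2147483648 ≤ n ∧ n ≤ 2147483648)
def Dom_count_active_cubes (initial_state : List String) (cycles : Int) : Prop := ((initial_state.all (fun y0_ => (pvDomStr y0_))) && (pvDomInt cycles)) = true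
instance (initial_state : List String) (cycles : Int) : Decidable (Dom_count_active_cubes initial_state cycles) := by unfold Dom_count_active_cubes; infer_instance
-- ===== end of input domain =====

-- B replaces A's two-phase neighbour rescan by a single tallying pass per cycle
-- (alternative algorithm, same cost; return values proved equal on all inputs).
-- ===== PORT A =====
-- cell type (x, y, z)
abbrev pvCell : Type := Int × Int × Int

-- the 26 relative neighbour offsets (identical comprehension in both Pythons)
def pvNeighbors : List pvCell :=
  (PySem.List.pyRange (-1) 2 1).flatMap (fun dx =>
    (PySem.List.pyRange (-1) 2 1).flatMap (fun dy =>
      (PySem.List.pyRange (-1) 2 1).filterMap (fun dz =>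
        if (dx, dy, dz) ≠ ((0 : Int), (0 : Int), (0 : Int)) then some (dx, dy, dz) else none)))

-- parsing loop (identical in both Pythons)
def pvParse (initial_state : List String) : PySem.Set pvCell :=
  (PySem.List.enumerate initial_state).foldl (fun ac yrow =>
    (PySem.List.enumerate yrow.2.toList).foldl (fun ac xc =>
      if xc.2 = '#' then PySem.Set.add ac (xc.1, yrow.1, (0 : Int)) else ac) ac)
    PySem.Set.empty

-- one cycle of A: scan each active cube's 26 neighbours, collecting inactive
-- candidates, then rescan each candidate's 26 neighbours
def pvStepA (S : PySem.Set pvCell) : PySem.Set pvCell :=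
  let p := S.foldl (fun (p : PySem.Set pvCell × PySem.Set pvCell) cube =>
      let q := pvNeighbors.foldl (fun (q : Int × PySem.Set pvCell) dd =>
          let nb : pvCell := (cube.1 + dd.1, cube.2.1 + dd.2.1, cube.2.2 + dd.2.2)
          if PySem.Set.contains S nb then (q.1 + 1, q.2) else (q.1, PySem.Set.add q.2 nb))
        (0, p.2)
      (if q.1 = 2 ∨ q.1 = 3 then PySem.Set.add p.1 cube else p.1, q.2))
    (PySem.Set.empty, PySem.Set.empty)
  p.2.foldl (fun ns cube =>
      let cnt := pvNeighbors.foldl (fun (cnt : Int) dd =>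
          if PySem.Set.contains S (cube.1 + dd.1, cube.2.1 + dd.2.1, cube.2.2 + dd.2.2)
          then cnt + 1 else cnt) 0
      if cnt = 3 then PySem.Set.add ns cube else ns)
    p.1

def count_active_cubes (initial_state : List String) (cycles : Int) : Int :=
  PySem.Set.len ((PySem.List.pyRange 0 cycles 1).foldl (fun S _ => pvStepA S) (pvParse initial_state))

-- ===== PORT B =====
-- one cycle of B: a single pass tallies every active cube's neighbour
-- contributions into one dict, then the rule is applied to the tally
def pvStepB (S : PySem.Set pvCell) : PySem.Set pvCell :=
  let counts := S.foldl (fun d cube =>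
      pvNeighbors.foldl (fun (d : PySem.Dict pvCell Int) dd =>
          let nb : pvCell := (cube.1 + dd.1, cube.2.1 + dd.2.1, cube.2.2 + dd.2.2)
          d.insert nb (d.getD nb 0 + 1)) d)
    PySem.Dict.empty
  counts.items.foldl (fun ac cn =>
      if cn.2 = 3 ∨ (cn.2 = 2 ∧ PySem.Set.contains S cn.1) then PySem.Set.add ac cn.1 else ac)
    PySem.Set.empty

def count_active_cubes_alt (initial_state : List String) (cycles : Int) : Int :=
  PySem.Set.len ((PySem.List.pyRange 0 cycles 1).foldl (fun S _ => pvStepB S) (pvParse initial_state))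

-- ===== PRECONDITION & SPEC =====
def Spec_count_active_cubes (initial_state : List String) (cycles : Int) (out : Int) : Prop := out = count_active_cubes_alt initial_state cycles
instance (initial_state : List String) (cycles : Int) (out : Int) : Decidable (Spec_count_active_cubes initial_state cycles out) := by unfold Spec_count_active_cubes; infer_instance

-- ===== CLAIM (what is proved, stated in full; the proofs are below) =====
def Claim_equal_count_active_cubes : Prop := ∀ (initial_state : List String) (cycles : Int), Dom_count_active_cubes initial_state cycles → Spec_count_active_cubes initial_state cycles (count_active_cubes initial_state cycles)


-- ===== LEMMAS AND PROOFS =====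

def pvAddc (c dd : pvCell) : pvCell := (c.1 + dd.1, c.2.1 + dd.2.1, c.2.2 + dd.2.2)
def pvSub (a c : pvCell) : pvCell := (a.1 - c.1, a.2.1 - c.2.1, a.2.2 - c.2.2)

lemma mem_pvNeighbors (d : pvCell) :
    d ∈ pvNeighbors ↔ (-1 ≤ d.1 ∧ d.1 < 2 ∧ -1 ≤ d.2.1 ∧ d.2.1 < 2 ∧ -1 ≤ d.2.2 ∧ d.2.2 < 2 ∧
      d ≠ ((0 : Int), (0 : Int), (0 : Int))) := by
  obtain ⟨x, y, z⟩ := d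
  simp only [pvNeighbors, List.mem_flatMap, List.mem_filterMap, PySem.List.mem_pyRange_one,
    Option.ite_none_right_eq_some, Option.some.injEq, ne_eq, Prod.ext_iff]
  constructor
  · rintro ⟨dx, hdx, dy, hdy, dz, hdz, hne, hx, hy, hz⟩
    subst hx hy hz; refine ⟨hdx.1, hdx.2, hdy.1, hdy.2, hdz.1, hdz.2, ?_⟩
    simpa using hne
  · rintro ⟨h1, h2, h3, h4, h5, h6, hne⟩
    exact ⟨x, ⟨h1, h2⟩, y, ⟨h3, h4⟩, z, ⟨h5, h6⟩, by simpa using hne, rfl, rfl, rfl⟩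

lemma pvSub_symm_mem (a c : pvCell) : pvSub a c ∈ pvNeighbors ↔ pvSub c a ∈ pvNeighbors := by
  simp only [mem_pvNeighbors, pvSub, ne_eq, Prod.ext_iff]
  constructor <;> (intro h; omega)

lemma pvAddc_inj (c : pvCell) : Function.Injective (pvAddc c) := by
  rintro ⟨a1, a2, a3⟩ ⟨b1, b2, b3⟩ h
  simp only [pvAddc, Prod.mk.injEq] at h
  simp only [Prod.mk.injEq]; omega

lemma pvAddc_sub (c b : pvCell) : pvAddc c (pvSub b c) = b := by
  simp only [pvAddc, pvSub, Prod.ext_iff]; constructor <;> [omega; constructor <;> omega]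

lemma pvSub_addc (c dd : pvCell) : pvSub (pvAddc c dd) c = dd := by
  simp only [pvAddc, pvSub, Prod.ext_iff]; constructor <;> [omega; constructor <;> omega]

lemma foldl_update_eq {β : Type} (l : List β) (g : β → List pvCell) (s : PySem.Set pvCell) :
    l.foldl (fun s b => PySem.Set.update s (g b)) s = PySem.Set.update s (l.flatMap g) := by
  induction l generalizing s with
  | nil => simp [PySem.Set.update]
  | cons b t ih => simp only [List.foldl_cons, List.flatMap_cons, ih, PySem.Set.update_append]
lemma pvNeighbors_nodup : pvNeighbors.Nodup := by decide

lemma countP_scan_eq_pvNb (S : List pvCell) (hS : S.Nodup) (c : pvCell) :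
    pvNeighbors.countP (fun dd => decide (pvAddc c dd ∈ S)) =
      S.countP (fun a => decide (pvSub a c ∈ pvNeighbors)) := by
  have hperm : ((pvNeighbors.filter (fun dd => decide (pvAddc c dd ∈ S))).map (pvAddc c)).Perm
      (S.filter (fun a => decide (pvSub a c ∈ pvNeighbors))) := by
    rw [List.perm_ext_iff_of_nodup
      (List.Nodup.map (pvAddc_inj c) (List.Nodup.filter _ pvNeighbors_nodup))
      (List.Nodup.filter _ hS)]
    intro b
    simp only [List.mem_map, List.mem_filter, decide_eq_true_eq]
    constructor
    · rintro ⟨dd, ⟨hdd, hmem⟩, rfl⟩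
      exact ⟨hmem, by rwa [pvSub_addc]⟩
    · rintro ⟨hb, hsub⟩
      exact ⟨pvSub b c, ⟨hsub, by rwa [pvAddc_sub]⟩, pvAddc_sub c b⟩
  have := hperm.length_eq
  rwa [List.length_map, ← List.countP_eq_length_filter, ← List.countP_eq_length_filter] at this

lemma count_map_addc (a c : pvCell) :
    (pvNeighbors.map (pvAddc a)).count c = if pvSub c a ∈ pvNeighbors then 1 else 0 := by
  rw [List.count, List.countP_map]
  have hfun : ((fun x => x == c) ∘ pvAddc a) = fun dd => dd == pvSub c a := by
    funext dd
    simp only [Function.comp_apply]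
    rw [Bool.eq_iff_iff, beq_iff_eq, beq_iff_eq]
    constructor
    · rintro rfl; rw [pvSub_addc]
    · rintro rfl; rw [pvAddc_sub]
  rw [hfun]
  by_cases h : pvSub c a ∈ pvNeighbors
  · rw [if_pos h, ← List.count, List.count_eq_one_of_mem pvNeighbors_nodup h]
  · rw [if_neg h, ← List.count, List.count_eq_zero_of_not_mem h]

lemma count_flat_eq_pvNb (S : List pvCell) (c : pvCell) :
    (S.flatMap (fun cube => pvNeighbors.map (pvAddc cube))).count c =
      S.countP (fun a => decide (pvSub a c ∈ pvNeighbors)) := by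
  induction S with
  | nil => simp
  | cons a t ih =>
    rw [List.flatMap_cons, List.count_append, ih, List.countP_cons, count_map_addc]
    have hsymm := pvSub_symm_mem a c
    by_cases h : pvSub c a ∈ pvNeighbors
    · rw [if_pos h, decide_eq_true (hsymm.mpr h), if_pos rfl]; omega
    · rw [if_neg h, decide_eq_false (fun hh => h (hsymm.mp hh))]; simp

lemma innerA_eq (S : PySem.Set pvCell) (cube : pvCell) (q2 : PySem.Set pvCell) :
    pvNeighbors.foldl (fun (q : Int × PySem.Set pvCell) dd =>
        let nb : pvCell := (cube.1 + dd.1, cube.2.1 + dd.2.1, cube.2.2 + dd.2.2)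
        if PySem.Set.contains S nb then (q.1 + 1, q.2) else (q.1, PySem.Set.add q.2 nb))
      ((0 : Int), q2)
    = ((pvNeighbors.countP (fun dd => decide (pvAddc cube dd ∈ S)) : Int),
       PySem.Set.update q2 ((pvNeighbors.filter
          (fun dd => !decide (pvAddc cube dd ∈ S))).map (pvAddc cube))) := by
  have hbody : (fun (q : Int × PySem.Set pvCell) dd =>
        let nb : pvCell := (cube.1 + dd.1, cube.2.1 + dd.2.1, cube.2.2 + dd.2.2)
        if PySem.Set.contains S nb then (q.1 + 1, q.2) else (q.1, PySem.Set.add q.2 nb))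
      = (fun (q : Int × PySem.Set pvCell) dd =>
        ((fun (a : Int) dd => if pvAddc cube dd ∈ S then a + 1 else a) q.1 dd,
         (fun (s : PySem.Set pvCell) dd =>
            if pvAddc cube dd ∈ S then s else PySem.Set.add s (pvAddc cube dd)) q.2 dd)) := by
    funext q dd
    show (if PySem.Set.contains S (pvAddc cube dd) then (q.1 + 1, q.2)
          else (q.1, PySem.Set.add q.2 (pvAddc cube dd))) = _
    by_cases h : pvAddc cube dd ∈ S
    · rw [if_pos ((PySem.Set.contains_iff S _).mpr h)]; simp [h]
    · rw [if_neg (fun hc => h ((PySem.Set.contains_iff S _).mp hc))]; simp [h]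
  rw [hbody, PySem.List.foldl_prod_mk
    (f := fun (a : Int) dd => if pvAddc cube dd ∈ S then a + 1 else a)
    (g := fun (s : PySem.Set pvCell) dd =>
      if pvAddc cube dd ∈ S then s else PySem.Set.add s (pvAddc cube dd))]
  refine Prod.ext ?_ ?_ <;> dsimp only
  · rw [PySem.List.foldl_ite_add_one (p := fun dd => pvAddc cube dd ∈ S)]
    simp
  · have hflip : (fun (s : PySem.Set pvCell) dd =>
          if pvAddc cube dd ∈ S then s else PySem.Set.add s (pvAddc cube dd))
        = (fun (s : PySem.Set pvCell) dd =>
          if ¬ pvAddc cube dd ∈ S then PySem.Set.add s (pvAddc cube dd) else s) := by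
      funext s dd
      by_cases h : pvAddc cube dd ∈ S <;> simp [h]
    rw [hflip, PySem.List.foldl_ite_eq_foldl_filter (p := fun dd => ¬ pvAddc cube dd ∈ S)
      (f := fun (s : PySem.Set pvCell) dd => PySem.Set.add s (pvAddc cube dd)),
      ← PySem.Set.update_map_eq_foldl_add]
    congr 2
    apply List.filter_congr
    intro dd _
    simp [decide_not]

lemma foldl_add_eq_update (l : List pvCell) (s : PySem.Set pvCell) :
    l.foldl PySem.Set.add s = PySem.Set.update s l := rfl

-- scan-count as an Int (A's second loop)
lemma innerCount_eq (S : PySem.Set pvCell) (cube : pvCell) :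
    pvNeighbors.foldl (fun (cnt : Int) dd =>
        if PySem.Set.contains S (cube.1 + dd.1, cube.2.1 + dd.2.1, cube.2.2 + dd.2.2)
        then cnt + 1 else cnt) 0
    = (pvNeighbors.countP (fun dd => decide (pvAddc cube dd ∈ S)) : Int) := by
  have hbody : (fun (cnt : Int) dd =>
        if PySem.Set.contains S (cube.1 + dd.1, cube.2.1 + dd.2.1, cube.2.2 + dd.2.2)
        then cnt + 1 else cnt)
      = (fun (cnt : Int) dd => if pvAddc cube dd ∈ S then cnt + 1 else cnt) := by
    funext cnt dd
    show (if PySem.Set.contains S (pvAddc cube dd) then cnt + 1 else cnt) = _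
    by_cases h : pvAddc cube dd ∈ S
    · rw [if_pos ((PySem.Set.contains_iff S _).mpr h), if_pos h]
    · rw [if_neg (fun hc => h ((PySem.Set.contains_iff S _).mp hc)), if_neg h]
  rw [hbody, PySem.List.foldl_ite_add_one (p := fun dd => pvAddc cube dd ∈ S)]
  simp

-- A's one cycle, in closed form
lemma stepA_eq (S : PySem.Set pvCell) :
    pvStepA S =
      PySem.Set.update
        (PySem.Set.update PySem.Set.empty (S.filter (fun cube =>
          decide ((pvNeighbors.countP (fun dd => decide (pvAddc cube dd ∈ S)) : Int) = 2 ∨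
                  (pvNeighbors.countP (fun dd => decide (pvAddc cube dd ∈ S)) : Int) = 3))))
        ((PySem.Set.update PySem.Set.empty (S.flatMap (fun cube => (pvNeighbors.filter
            (fun dd => !decide (pvAddc cube dd ∈ S))).map (pvAddc cube)))).filter
          (fun c => decide ((pvNeighbors.countP (fun dd => decide (pvAddc c dd ∈ S)) : Int) = 3))) := by
  unfold pvStepA
  have hbody : (fun (p : PySem.Set pvCell × PySem.Set pvCell) cube =>
      let q := pvNeighbors.foldl (fun (q : Int × PySem.Set pvCell) dd =>
          let nb : pvCell := (cube.1 + dd.1, cube.2.1 + dd.2.1, cube.2.2 + dd.2.2)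
          if PySem.Set.contains S nb then (q.1 + 1, q.2) else (q.1, PySem.Set.add q.2 nb))
        (0, p.2)
      (if q.1 = 2 ∨ q.1 = 3 then PySem.Set.add p.1 cube else p.1, q.2))
    = (fun (p : PySem.Set pvCell × PySem.Set pvCell) cube =>
      ((fun (s : PySem.Set pvCell) cube =>
          if ((pvNeighbors.countP (fun dd => decide (pvAddc cube dd ∈ S)) : Int) = 2 ∨
              (pvNeighbors.countP (fun dd => decide (pvAddc cube dd ∈ S)) : Int) = 3)
          then PySem.Set.add s cube else s) p.1 cube,
       (fun (s : PySem.Set pvCell) cube =>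
          PySem.Set.update s ((pvNeighbors.filter
            (fun dd => !decide (pvAddc cube dd ∈ S))).map (pvAddc cube))) p.2 cube)) := by
    funext p cube
    show ((if (pvNeighbors.foldl _ ((0 : Int), p.2)).1 = 2 ∨ (pvNeighbors.foldl _ ((0 : Int), p.2)).1 = 3
          then PySem.Set.add p.1 cube else p.1), (pvNeighbors.foldl _ ((0 : Int), p.2)).2) = _
    rw [innerA_eq S cube p.2]
  rw [hbody, PySem.List.foldl_prod_mk
    (f := fun (s : PySem.Set pvCell) cube =>
          if ((pvNeighbors.countP (fun dd => decide (pvAddc cube dd ∈ S)) : Int) = 2 ∨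
              (pvNeighbors.countP (fun dd => decide (pvAddc cube dd ∈ S)) : Int) = 3)
          then PySem.Set.add s cube else s)
    (g := fun (s : PySem.Set pvCell) cube =>
          PySem.Set.update s ((pvNeighbors.filter
            (fun dd => !decide (pvAddc cube dd ∈ S))).map (pvAddc cube)))]
  dsimp only
  rw [foldl_update_eq]
  rw [PySem.List.foldl_ite_eq_foldl_filter
    (p := fun cube => ((pvNeighbors.countP (fun dd => decide (pvAddc cube dd ∈ S)) : Int) = 2 ∨
              (pvNeighbors.countP (fun dd => decide (pvAddc cube dd ∈ S)) : Int) = 3))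
    (f := PySem.Set.add), foldl_add_eq_update]
  -- second phase
  have hbody2 : (fun (ns : PySem.Set pvCell) cube =>
      let cnt := pvNeighbors.foldl (fun (cnt : Int) dd =>
          if PySem.Set.contains S (cube.1 + dd.1, cube.2.1 + dd.2.1, cube.2.2 + dd.2.2)
          then cnt + 1 else cnt) 0
      if cnt = 3 then PySem.Set.add ns cube else ns)
    = (fun (ns : PySem.Set pvCell) cube =>
      if ((pvNeighbors.countP (fun dd => decide (pvAddc cube dd ∈ S)) : Int) = 3)
      then PySem.Set.add ns cube else ns) := by
    funext ns cube
    show (if pvNeighbors.foldl _ (0 : Int) = 3 then PySem.Set.add ns cube else ns) = _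
    rw [innerCount_eq S cube]
  rw [hbody2, PySem.List.foldl_ite_eq_foldl_filter
    (p := fun cube => ((pvNeighbors.countP (fun dd => decide (pvAddc cube dd ∈ S)) : Int) = 3))
    (f := PySem.Set.add), foldl_add_eq_update]

lemma mem_stepA (S : PySem.Set pvCell) (hS : S.Nodup) (c : pvCell) :
    c ∈ pvStepA S ↔
      (S.countP (fun a => decide (pvSub a c ∈ pvNeighbors)) = 3 ∨
       (S.countP (fun a => decide (pvSub a c ∈ pvNeighbors)) = 2 ∧ c ∈ S)) := by
  rw [stepA_eq]
  simp only [PySem.Set.mem_update, PySem.Set.empty, List.not_mem_nil, false_or,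
    List.mem_filter, decide_eq_true_eq, List.mem_flatMap, List.mem_map]
  have hc : ∀ b : pvCell, pvNeighbors.countP (fun dd => decide (pvAddc b dd ∈ S)) =
      S.countP (fun a => decide (pvSub a b ∈ pvNeighbors)) := fun b => countP_scan_eq_pvNb S hS b
  constructor
  · rintro (⟨hcS, h23⟩ | ⟨_, h3⟩)
    · rw [hc c] at h23
      rcases h23 with h2 | h3
      · exact Or.inr ⟨by exact_mod_cast h2, hcS⟩
      · exact Or.inl (by exact_mod_cast h3)
    · rw [hc c] at h3
      exact Or.inl (by exact_mod_cast h3)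
  · intro h
    rcases h with h3 | ⟨h2, hcS⟩
    · by_cases hmem : c ∈ S
      · exact Or.inl ⟨hmem, Or.inr (by rw [hc c]; exact_mod_cast h3)⟩
      · refine Or.inr ⟨?_, by rw [hc c]; exact_mod_cast h3⟩
        have hpos : 0 < S.countP (fun a => decide (pvSub a c ∈ pvNeighbors)) := by omega
        rw [List.countP_pos_iff] at hpos
        obtain ⟨a, haS, hsub⟩ := hpos
        rw [decide_eq_true_eq] at hsub
        have hca : pvSub c a ∈ pvNeighbors := (pvSub_symm_mem a c).mp hsub
        have haddc : pvAddc a (pvSub c a) = c := pvAddc_sub a c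
        refine ⟨a, haS, ⟨pvSub c a, ⟨⟨hca, ?_⟩, haddc⟩⟩⟩
        simp [haddc, hmem]
    · exact Or.inl ⟨hcS, Or.inl (by rw [hc c]; exact_mod_cast h2)⟩

lemma nodup_stepA (S : PySem.Set pvCell) : (pvStepA S).Nodup := by
  rw [stepA_eq]
  exact PySem.Set.nodup_update _ _ (PySem.Set.nodup_update _ _ List.nodup_nil)

lemma countsB_eq (S : PySem.Set pvCell) :
    S.foldl (fun d cube =>
      pvNeighbors.foldl (fun (d : PySem.Dict pvCell Int) dd =>
          let nb : pvCell := (cube.1 + dd.1, cube.2.1 + dd.2.1, cube.2.2 + dd.2.2)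
          d.insert nb (d.getD nb 0 + 1)) d) PySem.Dict.empty
    = PySem.Dict.counter (S.flatMap (fun cube => pvNeighbors.map (pvAddc cube))) := by
  have hbody : (fun (d : PySem.Dict pvCell Int) cube =>
      pvNeighbors.foldl (fun (d : PySem.Dict pvCell Int) dd =>
          let nb : pvCell := (cube.1 + dd.1, cube.2.1 + dd.2.1, cube.2.2 + dd.2.2)
          d.insert nb (d.getD nb 0 + 1)) d)
    = (fun (d : PySem.Dict pvCell Int) cube =>
      (pvNeighbors.map (pvAddc cube)).foldl
        (fun (d : PySem.Dict pvCell Int) x => d.insert x (d.getD x 0 + 1)) d) := by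
    funext d cube
    rw [List.foldl_map]
    rfl
  rw [hbody, ← List.foldl_flatMap, PySem.Dict.foldl_insert_getD_add_one_eq_counter]

lemma stepB_eq (S : PySem.Set pvCell) :
    pvStepB S = PySem.Set.update PySem.Set.empty
      ((PySem.Set.ofList (S.flatMap (fun cube => pvNeighbors.map (pvAddc cube)))).filter
        (fun k => decide (((S.flatMap (fun cube => pvNeighbors.map (pvAddc cube))).count k : Int) = 3 ∨
          (((S.flatMap (fun cube => pvNeighbors.map (pvAddc cube))).count k : Int) = 2 ∧ k ∈ S)))) := by
  unfold pvStepB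
  rw [countsB_eq]
  show List.foldl (fun ac cn => if cn.2 = 3 ∨ cn.2 = 2 ∧ PySem.Set.contains S cn.1
      then PySem.Set.add ac cn.1 else ac) PySem.Set.empty
    (PySem.Dict.counter (S.flatMap (fun cube => pvNeighbors.map (pvAddc cube)))).items = _
  rw [PySem.Dict.items_counter, List.foldl_map]
  have hbody : (fun (ac : PySem.Set pvCell) k =>
      if ((((S.flatMap (fun cube => pvNeighbors.map (pvAddc cube))).count k : Int)) = 3 ∨
          ((((S.flatMap (fun cube => pvNeighbors.map (pvAddc cube))).count k : Int)) = 2 ∧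
            PySem.Set.contains S k))
      then PySem.Set.add ac k else ac)
    = (fun (ac : PySem.Set pvCell) k =>
      if ((((S.flatMap (fun cube => pvNeighbors.map (pvAddc cube))).count k : Int)) = 3 ∨
          ((((S.flatMap (fun cube => pvNeighbors.map (pvAddc cube))).count k : Int)) = 2 ∧ k ∈ S))
      then PySem.Set.add ac k else ac) := by
    funext ac k
    by_cases h : k ∈ S
    · simp [h]
    · have : ¬ PySem.Set.contains S k = true := fun hc => h ((PySem.Set.contains_iff S k).mp hc)
      simp [h]
  show (PySem.Set.ofList _).foldl _ PySem.Set.empty = _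
  rw [hbody, PySem.List.foldl_ite_eq_foldl_filter
    (p := fun k => ((((S.flatMap (fun cube => pvNeighbors.map (pvAddc cube))).count k : Int)) = 3 ∨
          ((((S.flatMap (fun cube => pvNeighbors.map (pvAddc cube))).count k : Int)) = 2 ∧ k ∈ S)))
    (f := PySem.Set.add), foldl_add_eq_update]

lemma mem_stepB (S : PySem.Set pvCell) (_hS : S.Nodup) (c : pvCell) :
    c ∈ pvStepB S ↔
      (S.countP (fun a => decide (pvSub a c ∈ pvNeighbors)) = 3 ∨
       (S.countP (fun a => decide (pvSub a c ∈ pvNeighbors)) = 2 ∧ c ∈ S)) := by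
  rw [stepB_eq]
  simp only [PySem.Set.mem_update, PySem.Set.empty, List.not_mem_nil, false_or,
    List.mem_filter, PySem.Set.mem_ofList, decide_eq_true_eq]
  rw [count_flat_eq_pvNb]
  constructor
  · rintro ⟨_, h⟩
    rcases h with h3 | ⟨h2, hcS⟩
    · exact Or.inl (by exact_mod_cast h3)
    · exact Or.inr ⟨by exact_mod_cast h2, hcS⟩
  · intro h
    have hpos : 0 < S.countP (fun a => decide (pvSub a c ∈ pvNeighbors)) := by
      rcases h with h3 | ⟨h2, _⟩ <;> omega
    refine ⟨?_, ?_⟩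
    · rw [← List.count_pos_iff, count_flat_eq_pvNb]; exact hpos
    · rcases h with h3 | ⟨h2, hcS⟩
      · exact Or.inl (by exact_mod_cast h3)
      · exact Or.inr ⟨by exact_mod_cast h2, hcS⟩

lemma nodup_stepB (S : PySem.Set pvCell) : (pvStepB S).Nodup := by
  rw [stepB_eq]
  exact PySem.Set.nodup_update _ _ List.nodup_nil

lemma pvNb_congr (S S2 : List pvCell) (hS : S.Nodup) (hS2 : S2.Nodup)
    (h : ∀ x, x ∈ S ↔ x ∈ S2) (c : pvCell) :
    S.countP (fun a => decide (pvSub a c ∈ pvNeighbors)) =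
      S2.countP (fun a => decide (pvSub a c ∈ pvNeighbors)) :=
  List.Perm.countP_eq _ ((List.perm_ext_iff_of_nodup hS hS2).mpr h)

lemma nodup_foldl_pres {β σ : Type} (F : List σ → β → List σ)
    (hF : ∀ ac x, ac.Nodup → (F ac x).Nodup) :
    ∀ (l : List β) (s : List σ), s.Nodup → (l.foldl F s).Nodup := by
  intro l
  induction l with
  | nil => intro s hs; exact hs
  | cons x t ih => intro s hs; exact ih _ (hF s x hs)

lemma pvParse_nodup (l : List String) : (pvParse l).Nodup := by
  unfold pvParse
  apply nodup_foldl_pres _ _ _ _ List.nodup_nil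
  intro ac row hac
  apply nodup_foldl_pres _ _ _ _ hac
  intro ac2 xc hac2
  by_cases h : xc.2 = '#'
  · rw [if_pos h]; exact PySem.Set.nodup_add _ _ hac2
  · rw [if_neg h]; exact hac2

lemma loop_inv (l : List Int) (S S2 : PySem.Set pvCell) (hS : S.Nodup) (hS2 : S2.Nodup)
    (h : ∀ x, x ∈ S ↔ x ∈ S2) :
    (l.foldl (fun S _ => pvStepA S) S).Nodup ∧ (l.foldl (fun S _ => pvStepB S) S2).Nodup ∧
      (∀ x, x ∈ l.foldl (fun S _ => pvStepA S) S ↔ x ∈ l.foldl (fun S _ => pvStepB S) S2) := by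
  induction l generalizing S S2 with
  | nil => exact ⟨hS, hS2, h⟩
  | cons i t ih =>
    simp only [List.foldl_cons]
    apply ih (pvStepA S) (pvStepB S2) (nodup_stepA S) (nodup_stepB S2)
    intro x
    rw [mem_stepA S hS x, mem_stepB S2 hS2 x, pvNb_congr S S2 hS hS2 h x, h x]

-- ===== VERDICT (by name: the statement is the Claim_ definition above) =====
theorem count_active_cubes_spec : Claim_equal_count_active_cubes := by
  unfold Claim_equal_count_active_cubes
  intro initial_state cycles _
  unfold Spec_count_active_cubes count_active_cubes count_active_cubes_alt
  obtain ⟨hA, hB, hmem⟩ := loop_inv (PySem.List.pyRange 0 cycles 1)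
    (pvParse initial_state) (pvParse initial_state)
    (pvParse_nodup initial_state) (pvParse_nodup initial_state) (fun _ => Iff.rfl)
  have hperm := (List.perm_ext_iff_of_nodup hA hB).mpr hmem
  show ((((PySem.List.pyRange 0 cycles 1).foldl (fun S _ => pvStepA S) (pvParse initial_state)).length : Int)
      = (((PySem.List.pyRange 0 cycles 1).foldl (fun S _ => pvStepB S) (pvParse initial_state)).length : Int))
  exact_mod_cast hperm.length_eq
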